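-- pv_equiv track=rewrite | github.com/Christian-Albertini/python-challenge | Starter_Code/PyBank/main.py | find_dec
-- ===== SOURCE A (Python) =====
-- def find_dec(lst):
--     # Create values
--     max_decrease = 0
--     month_num = 0
--     # Loop through list
--     for i in range(1, len(lst)):
--         # Set decrease to be the difference between i-1 and i
--         decrease = int(lst[i]) - int(lst[i-1])
--         # Check to see if decrease is greater than max decrease
--         if decrease < max_decrease:
--             # If so, max decrease becomes decrease and set month to be the i
--             max_decrease = decrease
--             month_num = i
--     # Return max decrease and number of month it happens in
--     return [month_num, max_decrease]
-- ===== SOURCE B (Python) =====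
-- def find_dec(lst):
--     diffs = [int(lst[i]) - int(lst[i-1]) for i in range(1, len(lst))]
--     if diffs:
--         m = min(diffs)
--         if m < 0:
--             return [diffs.index(m) + 1, m]
--     return [0, 0]
-- ===== Notes on version B (the rewrite author's own statement) =====
-- stated objective: alternative
-- what changed: Replaces A's single fused scan with mutable best-so-far state by a two-pass decomposition: build the differences table, then take min() and its first index.
import Mathlib
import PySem

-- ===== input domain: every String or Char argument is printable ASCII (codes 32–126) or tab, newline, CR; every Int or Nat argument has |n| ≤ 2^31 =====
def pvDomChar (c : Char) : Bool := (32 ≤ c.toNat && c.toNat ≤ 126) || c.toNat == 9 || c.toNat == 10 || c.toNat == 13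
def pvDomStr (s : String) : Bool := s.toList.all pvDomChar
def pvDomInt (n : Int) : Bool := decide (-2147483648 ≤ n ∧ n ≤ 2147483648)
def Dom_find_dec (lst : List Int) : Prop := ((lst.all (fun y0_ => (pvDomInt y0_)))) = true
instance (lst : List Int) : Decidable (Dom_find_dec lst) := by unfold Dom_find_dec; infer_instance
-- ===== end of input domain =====

-- B replaces A's fused best-so-far scan by a two-pass decomposition (diffs table, then min + first index); same cost, different shape.

-- ===== PORT A =====
-- fused scan: running (max_decrease, month_num), updated when a strictly smaller decrease appears
def find_dec (lst : List Int) : List Int :=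
  let p := (PySem.List.pyRange 1 lst.length 1).foldl
    (fun (s : Int × Int) i =>
      let decrease := PySem.List.pyGetD lst i 0 - PySem.List.pyGetD lst (i-1) 0
      if decrease < s.1 then (decrease, i) else s) (0, 0)
  [p.2, p.1]

-- ===== PORT B =====
-- diffs table, then min and its first index; `.index` cannot fail since m ∈ diffs, so getD 0 is exact
def find_dec_alt (lst : List Int) : List Int :=
  let diffs := (PySem.List.pyRange 1 lst.length 1).map
    (fun i => PySem.List.pyGetD lst i 0 - PySem.List.pyGetD lst (i-1) 0)
  match PySem.List.min? diffs (fun x => x) with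
  | none => [0, 0]
  | some m =>
      if m < 0 then [((PySem.List.index? diffs m).getD 0 : Int) + 1, m] else [0, 0]

-- ===== PRECONDITION & SPEC =====
def Spec_find_dec (lst : List Int) (out : List Int) : Prop := out = find_dec_alt lst
instance (lst : List Int) (out : List Int) : Decidable (Spec_find_dec lst out) := by unfold Spec_find_dec; infer_instance

-- ===== CLAIM (what is proved, stated in full; the proofs are below) =====
def Claim_equal_find_dec : Prop := ∀ (lst : List Int), Dom_find_dec lst → Spec_find_dec lst (find_dec lst)

-- ===== LEMMAS AND PROOFS =====

-- A's scan as a structural recursion over the diff values, carrying the position of the head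
def pvLoop (md mn pos : Int) : List Int → Int × Int
  | [] => (md, mn)
  | d :: ds => if d < md then pvLoop d pos (pos + 1) ds else pvLoop md mn (pos + 1) ds

lemma fold_eq_pvLoop (f : Int → Int) :
    ∀ (k : Nat) (a md mn : Int),
      (PySem.List.pyRange a (a + k) 1).foldl
        (fun (s : Int × Int) i => if f i < s.1 then (f i, i) else s) (md, mn)
      = pvLoop md mn a ((PySem.List.pyRange a (a + k) 1).map f) := by
  intro k
  induction k with
  | zero =>
    intro a md mn
    rw [show (a:Int) + ((0:Nat):Int) = a by push_cast; ring, PySem.List.pyRange_one_eq_nil (le_refl a)]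
    simp [pvLoop]
  | succ n ih =>
    intro a md mn
    rw [PySem.List.pyRange_one_cons (by omega : a < a + (n + 1 : Nat))]
    have h : (a : Int) + 1 + n = a + (n + 1 : Nat) := by push_cast; ring
    simp only [List.foldl_cons, List.map_cons, pvLoop]
    split
    · rw [← h, ih (a + 1) (f a) a]
    · rw [← h, ih (a + 1) md mn]

lemma pvLoop_eq (ds : List Int) :
    ∀ md mn pos : Int,
      pvLoop md mn pos ds =
        match PySem.List.min? ds (fun x => x) with
        | none => (md, mn)
        | some m => if m < md then (m, pos + (ds.idxOf m : Int)) else (md, mn) := by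
  induction ds with
  | nil => intro md mn pos; simp [pvLoop, PySem.List.min?]
  | cons d ds ih =>
    intro md mn pos
    cases hmin : PySem.List.min? ds (fun x => x) with
    | none =>
      have hds : ds = [] := (PySem.List.min?_eq_none_iff _ _).mp hmin
      subst hds
      simp only [pvLoop, PySem.List.min?_id_cons, List.foldl_nil]
      split_ifs with h1
      · simp [List.idxOf_cons_self]
      · rfl
    | some m =>
      have hmem : m ∈ ds := PySem.List.min?_mem hmin
      have hminle : ∀ y ∈ ds, m ≤ y := by
        intro y hy; exact PySem.List.min?_isMin hmin y hy
      -- head value of min? (d :: ds)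
      have hcons : PySem.List.min? (d :: ds) (fun x => x) = some (min d m) := by
        rcases ds with _ | ⟨e, ds'⟩
        · simp at hmem
        · have h1 := PySem.List.min?_id_cons (x := e) (t := ds')
          rw [h1] at hmin
          have hm : ds'.foldl min e = m := by injection hmin
          rw [PySem.List.min?_id_cons]
          have : (e :: ds').foldl min d = min d (ds'.foldl min e) := by
            simp only [List.foldl_cons]
            exact List.foldl_assoc (op := min) (l := ds') (a₁ := d) (a₂ := e)
          rw [this, hm]
      rw [hcons]
      simp only [pvLoop]
      by_cases hdm : d < md
      · rw [if_pos hdm, ih d pos (pos + 1), hmin]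
        dsimp only
        have hmin_lt : min d m < md := by omega
        rw [if_pos hmin_lt]
        by_cases hmd : m < d
        · rw [if_pos hmd]
          have hne : d ≠ m := by omega
          have : min d m = m := by omega
          rw [this, List.idxOf_cons_ne _ hne]
          simp only [Prod.mk.injEq, Nat.succ_eq_add_one]
          push_cast
          exact ⟨trivial, by ring⟩
        · rw [if_neg hmd]
          have : min d m = d := by omega
          rw [this, List.idxOf_cons_self]
          simp
      · rw [if_neg hdm, ih md mn (pos + 1), hmin]
        dsimp only
        by_cases hmmd : m < md
        · rw [if_pos hmmd]
          have : min d m < md := by omega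
          rw [if_pos this]
          have hmind : min d m = m := by omega
          have hne : d ≠ m := by omega
          rw [hmind, List.idxOf_cons_ne _ hne]
          simp only [Prod.mk.injEq, Nat.succ_eq_add_one]
          push_cast
          exact ⟨trivial, by ring⟩
        · rw [if_neg hmmd]
          have : ¬ min d m < md := by omega
          rw [if_neg this]

lemma index?_getD_eq_idxOf : ∀ (ds : List Int) (m : Int), m ∈ ds →
    (PySem.List.index? ds m).getD 0 = ds.idxOf m := by
  intro ds
  induction ds with
  | nil => intro m h; simp at h
  | cons d ds ih =>
    intro m h
    by_cases hdm : d = m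
    · subst hdm
      rw [PySem.List.index?_cons_self, List.idxOf_cons_self]
      rfl
    · have hm : m ∈ ds := by
        rcases List.mem_cons.mp h with h1 | h1
        · exact absurd h1.symm hdm
        · exact h1
      rw [PySem.List.index?_cons_of_ne _ hdm, List.idxOf_cons_ne _ hdm]
      rcases Option.isSome_iff_exists.mp ((PySem.List.index?_isSome_iff _ _).mpr hm) with ⟨k, hk⟩
      have := ih m hm
      rw [hk] at this ⊢
      simp only [Option.map_some, Option.getD_some] at this ⊢
      omega

-- ===== VERDICT (by name: the statement is the Claim_ definition above) =====
theorem find_dec_spec : Claim_equal_find_dec := by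
  intro lst _
  unfold Spec_find_dec find_dec find_dec_alt
  have hk : (lst.length : Int) = 1 + ((lst.length - 1 : Nat) : Nat) ∨ lst.length = 0 := by
    rcases lst.length with _ | n
    · right; rfl
    · left; push_cast; omega
  set f : Int → Int := fun i => PySem.List.pyGetD lst i 0 - PySem.List.pyGetD lst (i-1) 0 with hf
  have key : (PySem.List.pyRange 1 (lst.length) 1).foldl
      (fun (s : Int × Int) i => if f i < s.1 then (f i, i) else s) (0, 0)
      = pvLoop 0 0 1 ((PySem.List.pyRange 1 (lst.length) 1).map f) := by
    rcases hk with h | h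
    · have := fold_eq_pvLoop f (lst.length - 1) 1 0 0
      rw [show (1 : Int) + ((lst.length - 1 : Nat) : Int) = (lst.length : Int) by omega] at this
      exact this
    · rw [h]
      simp [PySem.List.pyRange_one_eq_nil (by norm_num : (0:Int) ≤ 1), pvLoop]
  simp only []
  rw [key, pvLoop_eq]
  cases hmin : PySem.List.min? ((PySem.List.pyRange 1 (lst.length) 1).map f) (fun x => x) with
  | none => rfl
  | some m =>
    simp only []
    have hmem : m ∈ (PySem.List.pyRange 1 (lst.length) 1).map f := PySem.List.min?_mem hmin
    split_ifs with h
    · rw [index?_getD_eq_idxOf _ _ hmem]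
      simp only [List.cons.injEq, and_true]
      ring
    · rfl
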